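-- pv_equiv track=rewrite | github.com/MontyZoo/Coursera | UcsdBioinformatics1/Week2/week2_utility.py | get_maximum_skews
-- ===== SOURCE A (Python) =====
-- def skew(dna):
--     values = [0]
--     for nucleotide in dna:
--         value = values[-1]
--         if nucleotide == 'C':
--             value -= 1
--         elif nucleotide == 'G':
--             value += 1
--         values.append(value)
--     return values
--
-- def get_maximum_skews(dna):
--     """
--     Find a position in a genome where the skew diagram attains a maximum.
--     :param dna: A DNA string Genome.
--     :return: All integer(s) i maxmizing Skewi (Genome) among all values of i (from 0 to |Genome|).
--     """
--     skew_values = skew(dna)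
--     max_value_indices = []
--     max_value = -1000000
--     for index in range(len(dna)+1):
--         value = skew_values[index]
--         if value > max_value:
--             max_value_indices = [index]
--             max_value = value
--         elif value == max_value:
--             max_value_indices.append(index)
--     return max_value_indices
-- ===== SOURCE B (Python) =====
-- def get_maximum_skews(dna):
--     """
--     Single fused pass: maintain only the running skew, the running maximum
--     and its argmax positions; no intermediate skew list is materialised.
--     """
--     current = 0
--     max_value = 0
--     indices = [0]
--     pos = 0
--     for nucleotide in dna:
--         pos += 1
--         if nucleotide == 'C':
--             current -= 1
--         elif nucleotide == 'G':
--             current += 1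
--         if current > max_value:
--             indices = [pos]
--             max_value = current
--         elif current == max_value:
--             indices.append(pos)
--     return indices
-- ===== Notes on version B (the rewrite author's own statement) =====
-- stated objective: simpler
-- what changed: Fuses A's two passes (build the full skew prefix list, then scan it for the maximum) into one loop over the string that keeps only the running skew scalar, the running maximum and its index list, never materialising the skew array.
import Mathlib
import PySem

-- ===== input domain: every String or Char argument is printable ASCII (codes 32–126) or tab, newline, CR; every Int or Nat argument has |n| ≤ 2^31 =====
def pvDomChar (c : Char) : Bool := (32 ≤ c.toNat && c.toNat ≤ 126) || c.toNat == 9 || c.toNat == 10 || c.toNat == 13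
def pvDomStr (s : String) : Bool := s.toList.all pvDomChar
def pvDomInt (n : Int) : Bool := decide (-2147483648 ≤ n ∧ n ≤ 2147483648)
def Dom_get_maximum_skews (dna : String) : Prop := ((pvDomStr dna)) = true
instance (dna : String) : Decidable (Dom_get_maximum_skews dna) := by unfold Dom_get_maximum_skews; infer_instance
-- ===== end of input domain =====

-- B fuses A's two passes (materialise the skew prefix list, then scan it) into one
-- loop keeping only the running skew, the running maximum and its index list (simpler).


-- ===== PORT A =====
-- skew: append the updated running value to the list at each nucleotide
def pvSkewStep (values : List Int) (nucleotide : Char) : List Int :=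
  -- values[-1]: values is never empty (it starts as [0]), so pyGet? always returns some
  let value := (PySem.List.pyGet? values (-1)).getD 0
  let value := if nucleotide = 'C' then value - 1
               else if nucleotide = 'G' then value + 1 else value
  values ++ [value]

def pvSkew (dna : String) : List Int := dna.toList.foldl pvSkewStep [0]

-- body of A's max-scan loop over 'index in range(len(dna)+1)'
def pvMaxStep (skew_values : List Int) (st : List Int × Int) (index : Int) : List Int × Int :=
  -- skew_values[index]: index is always in range (len = len(dna)+1), so the default is never used
  let value := PySem.List.pyGetD skew_values index 0
  if value > st.2 then ([index], value)
  else if value = st.2 then (st.1 ++ [index], st.2)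
  else st

def get_maximum_skews (dna : String) : List Int :=
  let skew_values := pvSkew dna
  ((PySem.List.pyRange 0 ((dna.toList.length : Int) + 1) 1).foldl
      (pvMaxStep skew_values) ([], -1000000)).1

-- ===== PORT B =====
-- state: (current, max_value, indices, pos)
def pvAltStep (st : Int × Int × List Int × Int) (nucleotide : Char) :
    Int × Int × List Int × Int :=
  let pos := st.2.2.2 + 1
  let current := if nucleotide = 'C' then st.1 - 1
                 else if nucleotide = 'G' then st.1 + 1 else st.1
  if current > st.2.1 then (current, current, [pos], pos)
  else if current = st.2.1 then (current, st.2.1, st.2.2.1 ++ [pos], pos)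
  else (current, st.2.1, st.2.2.1, pos)

def get_maximum_skews_alt (dna : String) : List Int :=
  (dna.toList.foldl pvAltStep (0, 0, [0], 0)).2.2.1

-- ===== PRECONDITION & SPEC =====
def Spec_get_maximum_skews (dna : String) (out : List Int) : Prop := out = get_maximum_skews_alt dna
instance (dna : String) (out : List Int) : Decidable (Spec_get_maximum_skews dna out) := by unfold Spec_get_maximum_skews; infer_instance

-- ===== CLAIM (what is proved, stated in full; the proofs are below) =====
def Claim_equal_get_maximum_skews : Prop := ∀ (dna : String), Dom_get_maximum_skews dna → Spec_get_maximum_skews dna (get_maximum_skews dna)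

-- ===== LEMMAS AND PROOFS =====

-- the max-scan step as a function of an (index, value) pair
def pvGA (st : List Int × Int) (p : Int × Int) : List Int × Int :=
  if p.2 > st.2 then ([p.1], p.2)
  else if p.2 = st.2 then (st.1 ++ [p.1], st.2)
  else st

lemma pvSkew_len : ∀ (l : List Char) (acc : List Int),
    (List.foldl pvSkewStep acc l).length = acc.length + l.length := by
  intro l
  induction l with
  | nil => intro acc; simp
  | cons c l ih =>
      intro acc
      simp only [List.foldl_cons, ih, pvSkewStep]
      simp; omega

lemma pvFoldBridge (S : List Int) (init : List Int × Int) :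
    (PySem.List.pyRange 0 (S.length : Int) 1).foldl (pvMaxStep S) init
      = (PySem.List.enumerate S 0).foldl pvGA init := by
  rw [PySem.List.enumerate_eq_map_pyRange (d := 0), List.foldl_map]
  rfl

-- joint invariant of A's scan of the skew list and B's fused loop
lemma pvMain : ∀ (l : List Char),
    (PySem.List.enumerate (List.foldl pvSkewStep [0] l) 0).foldl pvGA ([], -1000000)
        = ((l.foldl pvAltStep (0, 0, [0], 0)).2.2.1,
           (l.foldl pvAltStep (0, 0, [0], 0)).2.1)
    ∧ (∃ ys, List.foldl pvSkewStep [0] l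
          = ys ++ [(l.foldl pvAltStep (0, 0, [0], 0)).1])
    ∧ (l.foldl pvAltStep (0, 0, [0], 0)).2.2.2 = (l.length : Int) := by
  intro l
  induction l using List.reverseRecOn with
  | nil =>
      refine ⟨by decide, ⟨[], by decide⟩, by decide⟩
  | append_singleton l c ih =>
      obtain ⟨hA, ⟨ys, hS⟩, hpos⟩ := ih
      set stB := l.foldl pvAltStep (0, 0, [0], 0) with hstB
      set S := List.foldl pvSkewStep [0] l with hSdef
      have hlen : S.length = l.length + 1 := by
        rw [hSdef, pvSkew_len]; simp only [List.length_cons, List.length_nil]; omega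
      have hstep : List.foldl pvSkewStep [0] (l ++ [c]) = S ++
          [if c = 'C' then stB.1 - 1 else if c = 'G' then stB.1 + 1 else stB.1] := by
        rw [List.foldl_append]
        show pvSkewStep S c = _
        unfold pvSkewStep
        rw [hS, PySem.List.pyGet?_neg_one_append_singleton]
        rfl
      have hB : (l ++ [c]).foldl pvAltStep (0, 0, [0], 0) = pvAltStep stB c := by
        rw [List.foldl_append]; rfl
      set v' : Int := if c = 'C' then stB.1 - 1 else if c = 'G' then stB.1 + 1 else stB.1
        with hv'
      have henum : PySem.List.enumerate (S ++ [v']) 0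
          = PySem.List.enumerate S 0 ++ [((S.length : Int), v')] := by
        rw [PySem.List.enumerate_append]
        simp [PySem.List.enumerate]
      have hidx : (S.length : Int) = stB.2.2.2 + 1 := by
        rw [hlen, hpos]; push_cast; ring
      rw [hstep, henum, List.foldl_append, hA, hB, hidx]
      simp only [List.foldl_cons, List.foldl_nil, pvGA, pvAltStep]
      rw [← hv']
      split_ifs with h1 h2 <;>
        refine ⟨rfl, ⟨S, rfl⟩, ?_⟩ <;>
        · show stB.2.2.2 + 1 = ((l ++ [c]).length : Int)
          rw [hpos]; simp only [List.length_append, List.length_cons, List.length_nil]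
          push_cast; ring

-- ===== VERDICT (by name: the statement is the Claim_ definition above) =====
theorem get_maximum_skews_spec : Claim_equal_get_maximum_skews := by
  intro dna _
  simp only [Spec_get_maximum_skews, get_maximum_skews, get_maximum_skews_alt, pvSkew]
  have hlen : (dna.toList.length : Int) + 1
      = ((List.foldl pvSkewStep [0] dna.toList).length : Int) := by
    rw [pvSkew_len]; simp only [List.length_cons, List.length_nil]; push_cast; ring
  rw [hlen, pvFoldBridge, (pvMain dna.toList).1]
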